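-- pv_equiv track=rewrite | github.com/heshi2019/weread2notion-pro | weread2notionpro/jsonTest.py | sort_notes_temp
-- ===== SOURCE A (Python) =====
-- def sort_notes_temp(chapter, bookmark_list):
--     """对笔记进行排序（纯净版，仅保留核心排序逻辑）"""
--     # 1. 主排序逻辑保持不变
--     bookmark_list = sorted(
--         bookmark_list,
--         key=lambda x: (
--             x.get("chapterUid", 1),
--             0 if (x.get("range", "") == "" or x.get("range").split("-")[0] == "")
--             else int(x.get("range").split("-")[0]),
--         ),
--     )
--
--     notes = []
--     if chapter != None:
--         # 2. 移除所有Notion相关操作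
--         d = {}
--         # 3. 保留分组逻辑
--         for data in bookmark_list:
--             chapterUid = data.get("chapterUid", 1)
--             if chapterUid not in d:
--                 d[chapterUid] = []
--             d[chapterUid].append(data)
--
--         # 4. 简化后的合并逻辑
--         for key, value in d.items():
--             if key in chapter:
--                 # 不再处理blockId
--                 notes.append(chapter.get(key))
--             notes.extend(value)
--     else:
--         notes.extend(bookmark_list)
--
--     return notes
-- ===== SOURCE B (Python) =====
-- def sort_notes_temp(chapter, bookmark_list):
--     """Same sort; then one boundary-detecting pass replaces A's grouping dict + merge loop."""
--     ordered = sorted(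
--         bookmark_list,
--         key=lambda x: (
--             x.get("chapterUid", 1),
--             0 if (x.get("range", "") == "" or x.get("range").split("-")[0] == "")
--             else int(x.get("range").split("-")[0]),
--         ),
--     )
--     notes = []
--     if chapter is None:
--         notes.extend(ordered)
--         return notes
--     prev = object()  # sentinel: equal to no chapterUid
--     for data in ordered:
--         cu = data.get("chapterUid", 1)
--         if cu != prev:
--             prev = cu
--             if cu in chapter:
--                 notes.append(chapter.get(cu))
--         notes.append(data)
--     return notes
-- ===== Notes on version B (the rewrite author's own statement) =====
-- stated objective: simpler
-- what changed: B keeps A's sorted() call but replaces A's two-phase grouping (build a chapterUid->list dict, then a second loop over dict items interleaving headers) with one boundary-detecting pass over the sorted list that keeps a previous-chapterUid sentinel and emits the chapter header whenever a new group begins; the intermediate dict disappears.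
import Mathlib
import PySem

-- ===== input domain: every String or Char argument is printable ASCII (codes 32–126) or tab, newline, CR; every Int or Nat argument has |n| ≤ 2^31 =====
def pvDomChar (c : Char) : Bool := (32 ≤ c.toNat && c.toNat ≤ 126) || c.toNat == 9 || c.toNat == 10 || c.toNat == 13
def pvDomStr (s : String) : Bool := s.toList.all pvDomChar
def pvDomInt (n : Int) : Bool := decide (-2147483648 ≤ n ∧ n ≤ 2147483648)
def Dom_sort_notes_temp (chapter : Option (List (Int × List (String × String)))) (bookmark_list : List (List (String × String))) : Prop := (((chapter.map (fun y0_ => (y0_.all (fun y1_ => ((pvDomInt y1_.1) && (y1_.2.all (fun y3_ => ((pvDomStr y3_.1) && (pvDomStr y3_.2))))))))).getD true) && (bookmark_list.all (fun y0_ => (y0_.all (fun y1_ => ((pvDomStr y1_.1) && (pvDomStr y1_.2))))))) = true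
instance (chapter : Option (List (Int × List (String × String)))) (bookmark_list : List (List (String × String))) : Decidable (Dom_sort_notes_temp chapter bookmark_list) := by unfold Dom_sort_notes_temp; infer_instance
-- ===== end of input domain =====

-- B fuses A's dict-grouping pass and its dict-merge loop into one boundary-detecting pass over the sorted list (objective: simpler).


-- Shared helpers: the sort key and the chapter-membership/lookup subexpressions both Pythons contain verbatim.
-- x.get("chapterUid", 1): the value is a string when present, the int 1 when absent — modelled as Int ⊕ String.
def pvCu (x : List (String × String)) : Int ⊕ String :=
  match PySem.Dict.get? (PySem.Dict.mk x) "chapterUid" with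
  | some s => Sum.inr s
  | none => Sum.inl 1

-- first component of the sort-key tuple (Lex gives Python's int-int / str-str comparison; mixed lists raise in Python and are outside Pre_)
def pvKey1 (x : List (String × String)) : Lex (Int ⊕ String) := toLex (pvCu x)

-- split? is some (sep "-" ≠ ""), so its getD default is never taken. 0 if range missing/empty/first piece empty else int(first piece); split("-") is never [], and
-- ofStr? = none (Python ValueError) is excluded by Pre_, so the getD defaults are never taken on admitted inputs
def pvKeyLoc (x : List (String × String)) : Int :=
  let r := PySem.Dict.getD (PySem.Dict.mk x) "range" ""
  let first := (((PySem.Str.split? r "-").getD []).headD "")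
  if r == "" || first == "" then 0 else (PySem.Int.ofStr? first).getD 0

-- Python 'key in chapter': chapter's keys are ints, so a string chapterUid never matches
def pvInChapter (ch : List (Int × List (String × String))) (k : Int ⊕ String) : Bool :=
  match k with
  | Sum.inl i => PySem.Dict.contains (PySem.Dict.mk ch) i
  | Sum.inr _ => false

-- Python 'chapter.get(key)': only evaluated under pvInChapter, so the Sum.inr/default branches are never taken
def pvChapterGet (ch : List (Int × List (String × String))) (k : Int ⊕ String) : List (String × String) :=
  match k with
  | Sum.inl i => PySem.Dict.getD (PySem.Dict.mk ch) i []
  | Sum.inr _ => []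

-- ===== PORT A =====
def sort_notes_temp (chapter : Option (List (Int × List (String × String)))) (bookmark_list : List (List (String × String))) : List (List (String × String)) :=
  let bl := PySem.List.sorted2 bookmark_list pvKey1 pvKeyLoc
  match chapter with
  | none => ([] : List (List (String × String))) ++ bl
  | some ch =>
    let d := bl.foldl (fun d data =>
        let c := pvCu data
        let d := if d.contains c then d else d.insert c ([] : List (List (String × String)))
        d.modify c [] (fun v => v ++ [data])) (PySem.Dict.empty)
    d.items.foldl (fun notes kv =>
        (if pvInChapter ch kv.1 then notes ++ [pvChapterGet ch kv.1] else notes) ++ kv.2) []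

-- ===== PORT B =====
def sort_notes_temp_alt (chapter : Option (List (Int × List (String × String)))) (bookmark_list : List (List (String × String))) : List (List (String × String)) :=
  let ordered := PySem.List.sorted2 bookmark_list pvKey1 pvKeyLoc
  match chapter with
  | none => ([] : List (List (String × String))) ++ ordered
  | some ch =>
    (ordered.foldl (fun acc data =>
        let c := pvCu data
        let notes := if acc.2 ≠ some c then
            (if pvInChapter ch c then acc.1 ++ [pvChapterGet ch c] else acc.1)
          else acc.1
        (notes ++ [data], some c))
      (([] : List (List (String × String))), (none : Option (Int ⊕ String)))).1

-- ===== PRECONDITION & SPEC =====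
-- Pre_ excludes exactly the inputs where Python A raises: a bookmark whose range's first piece is non-empty but not
-- int()-parsable (ValueError), and lists mixing bookmarks with and without "chapterUid" (the sort key then compares
-- int with str: TypeError). A returns on every other input.
def pvRangeOk (x : List (String × String)) : Bool :=
  let r := PySem.Dict.getD (PySem.Dict.mk x) "range" ""
  let first := (((PySem.Str.split? r "-").getD []).headD "")
  r == "" || first == "" || (PySem.Int.ofStr? first).isSome

def pvHasCu (x : List (String × String)) : Bool := PySem.Dict.contains (PySem.Dict.mk x) "chapterUid"

def Pre_sort_notes_temp (chapter : Option (List (Int × List (String × String)))) (bookmark_list : List (List (String × String))) : Prop :=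
  (∀ x ∈ bookmark_list, pvRangeOk x = true) ∧
  ((∀ x ∈ bookmark_list, pvHasCu x = true) ∨ (∀ x ∈ bookmark_list, pvHasCu x = false))
instance (chapter : Option (List (Int × List (String × String)))) (bookmark_list : List (List (String × String))) : Decidable (Pre_sort_notes_temp chapter bookmark_list) := by unfold Pre_sort_notes_temp; infer_instance

def pvWitness_sort_notes_temp : (Option (List (Int × List (String × String)))) × (List (List (String × String))) :=
  (some [(1, [("title", "ch1")])], [[("range", "3-9")], [("a", "b")]])

def Spec_sort_notes_temp (chapter : Option (List (Int × List (String × String)))) (bookmark_list : List (List (String × String))) (out : List (List (String × String))) : Prop := out = sort_notes_temp_alt chapter bookmark_list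
instance (chapter : Option (List (Int × List (String × String)))) (bookmark_list : List (List (String × String))) (out : List (List (String × String))) : Decidable (Spec_sort_notes_temp chapter bookmark_list out) := by unfold Spec_sort_notes_temp; infer_instance

-- ===== CLAIM (what is proved, stated in full; the proofs are below) =====
def Claim_equal_sort_notes_temp : Prop := ∀ (chapter : Option (List (Int × List (String × String)))) (bookmark_list : List (List (String × String))), Dom_sort_notes_temp chapter bookmark_list → Pre_sort_notes_temp chapter bookmark_list → Spec_sort_notes_temp chapter bookmark_list (sort_notes_temp chapter bookmark_list)

-- ===== LEMMAS AND PROOFS =====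

-- proof-only abbreviations for the three fold bodies (definitionally equal to the lambdas in the ports)
def pvStepD (d : PySem.Dict (Int ⊕ String) (List (List (String × String)))) (data : List (String × String)) : PySem.Dict (Int ⊕ String) (List (List (String × String))) :=
  let c := pvCu data
  let d := if d.contains c then d else d.insert c ([] : List (List (String × String)))
  d.modify c [] (fun v => v ++ [data])

def pvStepA (ch : List (Int × List (String × String))) (notes : List (List (String × String))) (kv : (Int ⊕ String) × List (List (String × String))) : List (List (String × String)) :=
  (if pvInChapter ch kv.1 then notes ++ [pvChapterGet ch kv.1] else notes) ++ kv.2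

def pvStepB (ch : List (Int × List (String × String))) (acc : List (List (String × String)) × Option (Int ⊕ String)) (data : List (String × String)) : List (List (String × String)) × Option (Int ⊕ String) :=
  let c := pvCu data
  let notes := if acc.2 ≠ some c then
      (if pvInChapter ch c then acc.1 ++ [pvChapterGet ch c] else acc.1)
    else acc.1
  (notes ++ [data], some c)

def pvHdr (ch : List (Int × List (String × String))) (k : Int ⊕ String) : List (List (String × String)) :=
  if pvInChapter ch k then [pvChapterGet ch k] else []

theorem pvBeq (a b : Int ⊕ String) : (a == b) = decide (a = b) := by
  cases a <;> cases b <;> simp [BEq.beq, Sum.instBEq.beq]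

theorem pvStepA_eq (ch : List (Int × List (String × String))) (notes : List (List (String × String))) (kv : (Int ⊕ String) × List (List (String × String))) :
    pvStepA ch notes kv = notes ++ (pvHdr ch kv.1 ++ kv.2) := by
  unfold pvStepA pvHdr
  split_ifs <;> simp

theorem pvMergeA_flat (ch : List (Int × List (String × String))) (items : List ((Int ⊕ String) × List (List (String × String)))) (acc : List (List (String × String))) :
    items.foldl (pvStepA ch) acc = acc ++ items.flatMap (fun kv => pvHdr ch kv.1 ++ kv.2) := by
  induction items generalizing acc with
  | nil => simp
  | cons kv rest ih => simp [pvStepA_eq, ih]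

theorem pvStepD_empty (x : List (String × String)) :
    pvStepD PySem.Dict.empty x = PySem.Dict.mk [(pvCu x, [x])] := by
  simp [pvStepD, PySem.Dict.empty, PySem.Dict.contains, PySem.Dict.modify, PySem.Dict.insert,
    PySem.Dict.getD, PySem.Dict.get?, pvBeq]

theorem pvGroupBuild (grp : List (List (String × String))) (c : Int ⊕ String) (g : List (List (String × String)))
    (h : ∀ y ∈ grp, pvCu y = c) :
    grp.foldl pvStepD (PySem.Dict.mk [(c, g)]) = PySem.Dict.mk [(c, g ++ grp)] := by
  induction grp generalizing g with
  | nil => simp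
  | cons y rest ih =>
    have hy : pvCu y = c := h y (by simp)
    subst hy
    have step : pvStepD (PySem.Dict.mk [(pvCu y, g)]) y = PySem.Dict.mk [(pvCu y, g ++ [y])] := by
      simp [pvStepD, PySem.Dict.contains, PySem.Dict.modify, PySem.Dict.insert,
        PySem.Dict.getD, PySem.Dict.get?, pvBeq]
    rw [List.foldl_cons, step, ih (g ++ [y]) (fun z hz => h z (by simp [hz]))]
    simp

theorem pvBuild_cons_ne (l : List (List (String × String))) (c : Int ⊕ String)
    (g : List (List (String × String))) (ds : List ((Int ⊕ String) × List (List (String × String))))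
    (h : ∀ y ∈ l, pvCu y ≠ c) :
    l.foldl pvStepD (PySem.Dict.mk ((c, g) :: ds)) =
      PySem.Dict.mk ((c, g) :: (l.foldl pvStepD (PySem.Dict.mk ds)).items) := by
  induction l generalizing ds with
  | nil => simp
  | cons y rest ih =>
    have hcy : ¬ (c = pvCu y) := fun e => h y (by simp) e.symm
    have step : pvStepD (PySem.Dict.mk ((c, g) :: ds)) y =
        PySem.Dict.mk ((c, g) :: (pvStepD (PySem.Dict.mk ds) y).items) := by
      simp only [pvStepD, PySem.Dict.contains, PySem.Dict.modify, PySem.Dict.insert,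
        PySem.Dict.getD, PySem.Dict.get?, pvBeq, List.any_cons, List.map_cons,
        hcy, decide_false, Bool.false_or, if_false, decide_eq_true_eq]
      split_ifs <;> simp_all
    rw [List.foldl_cons, step]
    have := ih (pvStepD (PySem.Dict.mk ds) y).items (fun z hz => h z (by simp [hz]))
    simpa using this

theorem pvB_append (ch : List (Int × List (String × String))) (l : List (List (String × String)))
    (acc : List (List (String × String))) (p : Option (Int ⊕ String)) :
    (l.foldl (pvStepB ch) (acc, p)).1 = acc ++ (l.foldl (pvStepB ch) ([], p)).1 := by
  induction l generalizing acc p with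
  | nil => simp
  | cons y rest ih =>
    rw [List.foldl_cons, List.foldl_cons]
    have e1 : pvStepB ch (acc, p) y = ((pvStepB ch (acc, p) y).1, some (pvCu y)) := by
      simp [pvStepB]
    have e2 : pvStepB ch ([], p) y = ((pvStepB ch ([], p) y).1, some (pvCu y)) := by
      simp [pvStepB]
    rw [e1, e2, ih _ (some (pvCu y)), ih ((pvStepB ch ([], p) y).1) (some (pvCu y))]
    have e3 : (pvStepB ch (acc, p) y).1 = acc ++ (pvStepB ch ([], p) y).1 := by
      simp only [pvStepB]
      split_ifs <;> simp
    rw [e3, List.append_assoc]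

theorem pvB_group (ch : List (Int × List (String × String))) (grp : List (List (String × String)))
    (c : Int ⊕ String) (acc : List (List (String × String)))
    (h : ∀ y ∈ grp, pvCu y = c) :
    grp.foldl (pvStepB ch) (acc, some c) = (acc ++ grp, some c) := by
  induction grp generalizing acc with
  | nil => simp
  | cons y rest ih =>
    have hy : pvCu y = c := h y (by simp)
    have step : pvStepB ch (acc, some c) y = (acc ++ [y], some c) := by
      simp [pvStepB, hy]
    rw [List.foldl_cons, step, ih (acc ++ [y]) (fun z hz => h z (by simp [hz]))]
    simp

theorem pvB_first (ch : List (Int × List (String × String))) (x : List (String × String))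
    (p : Option (Int ⊕ String)) (acc : List (List (String × String)))
    (h : p ≠ some (pvCu x)) :
    pvStepB ch (acc, p) x = (acc ++ (pvHdr ch (pvCu x) ++ [x]), some (pvCu x)) := by
  simp only [pvStepB, pvHdr, h, ne_eq, not_false_iff, if_true]
  split_ifs <;> simp

theorem pvB_prev (ch : List (Int × List (String × String))) (r : List (String × String))
    (r' : List (List (String × String))) (c : Int ⊕ String) (h : pvCu r ≠ c) :
    (r :: r').foldl (pvStepB ch) ([], some c) = (r :: r').foldl (pvStepB ch) ([], none) := by
  rw [List.foldl_cons, List.foldl_cons,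
    pvB_first ch r (some c) [] (by simpa using fun e => h e.symm),
    pvB_first ch r none [] (by simp)]

-- main invariant: on a list whose pvKey1-sequence is nondecreasing, A's dict-then-merge equals B's single pass
theorem pvMain (ch : List (Int × List (String × String))) :
    ∀ (n : Nat) (s : List (List (String × String))), s.length ≤ n →
    s.Pairwise (fun a b => pvKey1 a ≤ pvKey1 b) →
    ((s.foldl pvStepD PySem.Dict.empty).items).foldl (pvStepA ch) [] =
      (s.foldl (pvStepB ch) ([], none)).1 := by
  intro n
  induction n with
  | zero =>
    intro s hs _
    have : s = [] := List.length_eq_zero_iff.mp (Nat.le_zero.mp hs)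
    subst this
    simp [PySem.Dict.empty]
  | succ n ih =>
    intro s hlen hpw
    match s with
    | [] => simp [PySem.Dict.empty]
    | x :: t =>
      have hpw_t : t.Pairwise (fun a b => pvKey1 a ≤ pvKey1 b) := (List.pairwise_cons.mp hpw).2
      have hxt : ∀ y ∈ t, pvKey1 x ≤ pvKey1 y := (List.pairwise_cons.mp hpw).1
      have ht : t.takeWhile (fun y => pvCu y == pvCu x) ++ t.dropWhile (fun y => pvCu y == pvCu x) = t :=
        List.takeWhile_append_dropWhile
      set c := pvCu x with hc
      set grp := t.takeWhile (fun y => pvCu y == c) with hgrpdef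
      set rest := t.dropWhile (fun y => pvCu y == c) with hrestdef
      have hgrp : ∀ y ∈ grp, pvCu y = c := by
        intro y hy
        have := List.mem_takeWhile_imp hy
        simpa [pvBeq] using this
      have hrest : ∀ z ∈ rest, pvCu z ≠ c := by
        intro z hz
        cases hre : rest with
        | nil => rw [hre] at hz; simp at hz
        | cons r r' =>
          have hr : pvCu r ≠ c := by
            have h0 := List.head?_dropWhile_not (fun y => pvCu y == c) t
            rw [← hrestdef, hre] at h0
            simpa [pvBeq] using h0
          have hrt : r ∈ t := by
            rw [← ht]
            exact List.mem_append_right _ (by simp [hre])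
          have hlt : pvKey1 x < pvKey1 r := by
            refine lt_of_le_of_ne (hxt r hrt) (fun e => hr ?_)
            have : pvCu x = pvCu r := toLex_inj.mp e
            rw [← this]
          have hrr' : (r :: r').Pairwise (fun a b => pvKey1 a ≤ pvKey1 b) := by
            have h1 : (grp ++ rest).Pairwise (fun a b => pvKey1 a ≤ pvKey1 b) := by
              rw [ht]; exact hpw_t
            have := (List.pairwise_append.mp h1).2.1
            rwa [hre] at this
          rw [hre] at hz
          rcases List.mem_cons.mp hz with rfl | hz'
          · exact hr
          · intro e
            have hrz : pvKey1 r ≤ pvKey1 z := (List.pairwise_cons.mp hrr').1 z hz'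
            have hzx : pvKey1 z = pvKey1 x := by rw [pvKey1, pvKey1, e, hc]
            exact absurd (lt_of_lt_of_le hlt hrz) (by rw [hzx]; exact lt_irrefl _)
      have hpw_rest : rest.Pairwise (fun a b => pvKey1 a ≤ pvKey1 b) := by
        have h1 : (grp ++ rest).Pairwise (fun a b => pvKey1 a ≤ pvKey1 b) := by
          rw [ht]; exact hpw_t
        exact (List.pairwise_append.mp h1).2.1
      have hlen_rest : rest.length ≤ n := by
        have h1 : rest.length ≤ t.length := by
          rw [hrestdef]; exact (List.dropWhile_sublist _).length_le
        have h2 : t.length ≤ n := by simpa using hlen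
        omega
      have ihrest := ih rest hlen_rest hpw_rest
      -- A side: the grouping dict over x :: t is (c, x :: grp) followed by the dict of rest
      have hA : (x :: t).foldl pvStepD PySem.Dict.empty
          = PySem.Dict.mk ((c, x :: grp) :: (rest.foldl pvStepD PySem.Dict.empty).items) := by
        rw [List.foldl_cons, pvStepD_empty, ← hc, ← ht, List.foldl_append,
          pvGroupBuild grp c [x] hgrp]
        have h1 : ([x] ++ grp : List (List (String × String))) = x :: grp := by simp
        rw [h1]
        exact pvBuild_cons_ne rest c (x :: grp) [] hrest
      -- B side: the single pass emits the header and the whole first group, then continues on rest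
      have hB : ((x :: t).foldl (pvStepB ch) ([], none)).1
          = (([] ++ (pvHdr ch c ++ [x])) ++ grp) ++ (rest.foldl (pvStepB ch) ([], none)).1 := by
        rw [List.foldl_cons, pvB_first ch x none [] (by simp), ← hc, ← ht, List.foldl_append,
          pvB_group ch grp c _ hgrp]
        cases hre : rest with
        | nil => simp
        | cons r r' =>
          rw [pvB_append ch (r :: r') _ (some c),
            pvB_prev ch r r' c (hrest r (by simp [hre]))]
      rw [hA, hB]
      rw [show (PySem.Dict.mk ((c, x :: grp) :: (rest.foldl pvStepD PySem.Dict.empty).items)).items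
          = (c, x :: grp) :: (rest.foldl pvStepD PySem.Dict.empty).items from rfl]
      rw [List.foldl_cons, pvStepA_eq, pvMergeA_flat]
      have hflat : ((rest.foldl pvStepD PySem.Dict.empty).items).flatMap (fun kv => pvHdr ch kv.1 ++ kv.2)
          = ((rest.foldl pvStepD PySem.Dict.empty).items).foldl (pvStepA ch) [] := by
        rw [pvMergeA_flat]; simp
      rw [hflat, ihrest]
      simp

-- the tuple-key sort of the Pythons is the lexicographic-key sort
theorem pvSorted2_eq (xs : List (List (String × String))) :
    PySem.List.sorted2 xs pvKey1 pvKeyLoc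
      = PySem.List.sorted xs (fun x => toLex (pvKey1 x, pvKeyLoc x)) := by
  rw [PySem.List.sorted_eq_foldl_insertBy]
  unfold PySem.List.sorted2
  simp only [if_neg (by simp : ¬ (false = true))]
  congr 1
  funext acc x
  congr 1
  funext a b
  by_cases h1 : pvKey1 a < pvKey1 b
  · simp [Prod.Lex.lt_iff, h1]
  · by_cases h2 : pvKey1 b < pvKey1 a
    · have hne : ¬ (pvKey1 a = pvKey1 b) := fun e => absurd (e ▸ h2) (lt_irrefl _)
      simp [Prod.Lex.lt_iff, h1, h2, hne]
    · have heq : pvKey1 a = pvKey1 b := le_antisymm (not_lt.mp h2) (not_lt.mp h1)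
      simp [Prod.Lex.lt_iff, heq]

theorem pvSortedPairwise (xs : List (List (String × String))) :
    (PySem.List.sorted2 xs pvKey1 pvKeyLoc).Pairwise (fun a b => pvKey1 a ≤ pvKey1 b) := by
  rw [pvSorted2_eq]
  refine (PySem.List.sorted_pairwise xs (fun x => toLex (pvKey1 x, pvKeyLoc x))).imp ?_
  intro a b h
  rcases Prod.Lex.le_iff.mp h with h' | ⟨h', _⟩
  · exact le_of_lt (by simpa using h')
  · exact le_of_eq (by simpa using h')

-- ===== VERDICT (by name: the statement is the Claim_ definition above) =====
theorem sort_notes_temp_spec : Claim_equal_sort_notes_temp := by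
  unfold Claim_equal_sort_notes_temp
  intro chapter bookmark_list _ _
  unfold Spec_sort_notes_temp
  cases chapter with
  | none => rfl
  | some ch =>
    show ((PySem.List.sorted2 bookmark_list pvKey1 pvKeyLoc).foldl pvStepD PySem.Dict.empty).items.foldl (pvStepA ch) []
        = ((PySem.List.sorted2 bookmark_list pvKey1 pvKeyLoc).foldl (pvStepB ch) ([], none)).1
    exact pvMain ch _ _ le_rfl (pvSortedPairwise bookmark_list)
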